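-- pv_equiv track=rewrite | github.com/ThomasCDeveloper/advent-of-code | 2025-Python/solutions/09/solution.py | part2
-- ===== SOURCE A (Python) =====
-- def area(p1, p2):
--     return (abs(p1[0] - p2[0]) + 1) * (abs(p1[1] - p2[1]) + 1)
--
-- def segment_hits_interior_rect(seg, xmin, xmax, ymin, ymax):
--     (ax, ay), (bx, by) = seg
--     if ax == bx:
--         x = ax
--         if not (xmin < x < xmax):
--             return False
--         sy0, sy1 = sorted([ay, by])
--         return max(sy0, ymin) < min(sy1, ymax)
--
--     y = ay
--     if not (ymin < y < ymax):
--         return False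
--     sx0, sx1 = sorted([ax, bx])
--     return max(sx0, xmin) < min(sx1, xmax)
--
-- def part2(corners):
--     max_area = 0
--     n = len(corners)
--     segments = [[corners[i], corners[(i + 1) % n]] for i in range(n)]
--
--     for i in range(n - 1):
--         c1 = corners[i]
--         for j in range(i + 1, n):
--             c2 = corners[j]
--             area_12 = area(c1, c2)
--             if area_12 <= max_area:
--                 continue
--
--             xmin, xmax = sorted([c1[0], c2[0]])
--             ymin, ymax = sorted([c1[1], c2[1]])
--
--             is_valid = True
--             for seg in segments:
--                 if segment_hits_interior_rect(seg, xmin, xmax, ymin, ymax):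
--                     is_valid = False
--                     break
--             if is_valid:
--                 max_area = area_12
--
--     return max_area
-- ===== SOURCE B (Python) =====
-- def part2(corners):
--     segs = list(zip(corners, corners[1:] + corners[:1]))
--
--     def blocked(x1, y1, x2, y2):
--         xlo, xhi = min(x1, x2), max(x1, x2)
--         ylo, yhi = min(y1, y2), max(y1, y2)
--         for (ax, ay), (bx, by) in segs:
--             if ax == bx:
--                 if xlo < ax < xhi and max(min(ay, by), ylo) < min(max(ay, by), yhi):
--                     return True
--             elif ylo < ay < yhi and max(min(ax, bx), xlo) < min(max(ax, bx), xhi):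
--                 return True
--         return False
--
--     cands = []
--     rest = corners
--     while rest:
--         (x1, y1), rest = rest[0], rest[1:]
--         for (x2, y2) in rest:
--             cands.append(((abs(x1 - x2) + 1) * (abs(y1 - y2) + 1), x1, y1, x2, y2))
--     cands.sort(key=lambda t: t[0], reverse=True)
--     for a, x1, y1, x2, y2 in cands:
--         if not blocked(x1, y1, x2, y2):
--             return a
--     return 0
-- ===== Notes on version B (the rewrite author's own statement) =====
-- stated objective: alternative
-- what changed: Replaces A's interleaved prune-and-track maximum over index-based nested loops with a staged pipeline: zip-based segment list, candidate pairs generated by structural recursion on list suffixes, a sort of all candidates by area descending, then an early-return scan for the first pair whose rectangle interior no segment crosses (0 if none).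
import Mathlib
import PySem

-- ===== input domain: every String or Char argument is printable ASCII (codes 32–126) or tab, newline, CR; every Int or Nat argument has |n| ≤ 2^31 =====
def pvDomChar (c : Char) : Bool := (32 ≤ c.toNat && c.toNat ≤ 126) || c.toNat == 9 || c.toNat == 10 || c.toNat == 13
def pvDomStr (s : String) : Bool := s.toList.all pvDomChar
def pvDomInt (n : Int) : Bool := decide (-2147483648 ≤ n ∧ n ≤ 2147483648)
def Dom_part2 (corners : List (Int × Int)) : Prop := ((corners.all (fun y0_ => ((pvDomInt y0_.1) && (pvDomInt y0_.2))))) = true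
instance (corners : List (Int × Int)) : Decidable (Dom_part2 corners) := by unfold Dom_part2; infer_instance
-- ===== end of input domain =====

-- B replaces A's interleaved prune-and-track nested index loops by a staged pipeline
-- (zip segments, suffix-recursion candidates, sort by area descending, first-valid scan);
-- same result, no speed claim.

-- ===== PORT A =====
-- Source A helper `area`
def pvArea (p1 p2 : Int × Int) : Int :=
  (|p1.1 - p2.1| + 1) * (|p1.2 - p2.2| + 1)

-- Source A helper `segment_hits_interior_rect`
def pvSegHits (seg : (Int × Int) × (Int × Int)) (xmin xmax ymin ymax : Int) : Bool :=
  let ax := seg.1.1; let ay := seg.1.2; let bx := seg.2.1; let by' := seg.2.2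
  if ax = bx then
    if ¬ (xmin < ax ∧ ax < xmax) then false
    else decide (max (min ay by') ymin < min (max ay by') ymax)
  else
    if ¬ (ymin < ay ∧ ay < ymax) then false
    else decide (max (min ax bx) xmin < min (max ax bx) xmax)

-- the inner `for seg in segments: … break` validity loop (xmin/xmax, ymin/ymax via sorted of a 2-list = min/max)
def pvValid (segments : List ((Int × Int) × (Int × Int))) (c1 c2 : Int × Int) : Bool :=
  ! segments.any (fun seg =>
      pvSegHits seg (min c1.1 c2.1) (max c1.1 c2.1) (min c1.2 c2.2) (max c1.2 c2.2))

-- Source A: segments = [[corners[i], corners[(i+1) % n]] for i in range(n)]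
def pvSegments (corners : List (Int × Int)) : List ((Int × Int) × (Int × Int)) :=
  (PySem.List.pyRange 0 (corners.length : Int) 1).map (fun i =>
    (PySem.List.pyGetD corners i (0, 0),
     PySem.List.pyGetD corners (PySem.Int.mod (i + 1) (corners.length : Int)) (0, 0)))

def part2 (corners : List (Int × Int)) : Int :=
  let n : Int := corners.length
  let segments := pvSegments corners
  (PySem.List.pyRange 0 (n - 1) 1).foldl (fun acc i =>
      let c1 := PySem.List.pyGetD corners i (0, 0)
      (PySem.List.pyRange (i + 1) n 1).foldl (fun acc2 j =>
          let c2 := PySem.List.pyGetD corners j (0, 0)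
          let a12 := pvArea c1 c2
          if a12 ≤ acc2 then acc2
          else if pvValid segments c1 c2 then a12 else acc2) acc) 0

-- ===== PORT B =====
-- Source B: segs = list(zip(corners, corners[1:] + corners[:1]))
def pvSegs (corners : List (Int × Int)) : List ((Int × Int) × (Int × Int)) :=
  corners.zip (corners.drop 1 ++ corners.take 1)

-- Source B local `blocked` (early-return loop = any)
def pvBlocked (segs : List ((Int × Int) × (Int × Int))) (x1 y1 x2 y2 : Int) : Bool :=
  let xlo := min x1 x2; let xhi := max x1 x2
  let ylo := min y1 y2; let yhi := max y1 y2
  segs.any (fun s =>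
    let ax := s.1.1; let ay := s.1.2; let bx := s.2.1; let by' := s.2.2
    if ax = bx then
      decide (xlo < ax ∧ ax < xhi) && decide (max (min ay by') ylo < min (max ay by') yhi)
    else
      decide (ylo < ay ∧ ay < yhi) && decide (max (min ax bx) xlo < min (max ax bx) xhi))

-- Source B: the `while rest:` candidate-building loop, as structural recursion on the suffix
def pvCands : List (Int × Int) → List (Int × Int × Int × Int × Int)
  | [] => []
  | c :: rest =>
      rest.map (fun d => ((|c.1 - d.1| + 1) * (|c.2 - d.2| + 1), c.1, c.2, d.1, d.2))
        ++ pvCands rest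

def part2_alt (corners : List (Int × Int)) : Int :=
  let segs := pvSegs corners
  let sortedC := PySem.List.sorted (pvCands corners) (fun t => t.1) true
  match sortedC.find? (fun t => ! pvBlocked segs t.2.1 t.2.2.1 t.2.2.2.1 t.2.2.2.2) with
  | some t => t.1
  | none => 0

-- ===== PRECONDITION & SPEC =====
def Spec_part2 (corners : List (Int × Int)) (out : Int) : Prop := out = part2_alt corners
instance (corners : List (Int × Int)) (out : Int) : Decidable (Spec_part2 corners out) := by unfold Spec_part2; infer_instance

-- ===== CLAIM (what is proved, stated in full; the proofs are below) =====
def Claim_equal_part2 : Prop := ∀ (corners : List (Int × Int)), Dom_part2 corners → Spec_part2 corners (part2 corners)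

-- ===== LEMMAS AND PROOFS =====

-- every rectangle area is at least 1
theorem pvArea_one_le (p q : Int × Int) : 1 ≤ pvArea p q := by
  have h1 : (0:Int) ≤ |p.1 - q.1| := abs_nonneg _
  have h2 : (0:Int) ≤ |p.2 - q.2| := abs_nonneg _
  unfold pvArea; nlinarith

-- the max of the scores, as a foldr (generic in the element type and score)
def pvM {α : Type} (s : α → Int) (v : α → Bool) (l : List α) : Int :=
  l.foldr (fun p m => max (if v p then s p else 0) m) 0

theorem pvM_nonneg {α : Type} (s : α → Int) (v : α → Bool) (l : List α) : 0 ≤ pvM s v l := by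
  induction l with
  | nil => simp [pvM]
  | cons h t ih => simp only [pvM, List.foldr] at *; omega

theorem pvM_le {α : Type} (s : α → Int) (v : α → Bool) (l : List α) (c : Int) (hc : 0 ≤ c)
    (h : ∀ p ∈ l, s p ≤ c) : pvM s v l ≤ c := by
  induction l with
  | nil => simpa [pvM]
  | cons x t ih =>
    have hx := h x (by simp)
    have ht := ih (fun p hp => h p (by simp [hp]))
    simp only [pvM, List.foldr] at *
    split_ifs <;> omega

-- A's prune-and-track fold computes the running max of the scores
theorem pvA_fold {α : Type} (s : α → Int) (v : α → Bool) (l : List α)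
    (hs : ∀ p ∈ l, 1 ≤ s p) (a : Int) (ha : 0 ≤ a) :
    l.foldl (fun acc p => if s p ≤ acc then acc else if v p then s p else acc) a
      = max a (pvM s v l) := by
  induction l generalizing a with
  | nil => simp [pvM]; omega
  | cons x t ih =>
    have hx := hs x (by simp)
    have hst : ∀ p ∈ t, 1 ≤ s p := fun p hp => hs p (by simp [hp])
    simp only [List.foldl, pvM, List.foldr]
    by_cases hle : s x ≤ a
    · by_cases hv : v x
      · rw [if_pos hle, ih hst a ha]; simp only [pvM]; simp [hv]; omega
      · rw [if_pos hle, ih hst a ha]; simp only [pvM]; simp [hv]; omega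
    · rw [if_neg hle]
      by_cases hv : v x
      · rw [if_pos hv, ih hst _ (by omega)]; simp only [pvM]; simp [hv]; omega
      · rw [if_neg hv, ih hst a ha]; simp only [pvM]; simp [hv]; omega

-- on a list sorted by score descending, the first valid element's score is the max score
theorem pvFind_some {α : Type} (s : α → Int) (v : α → Bool) (S : List α) (p : α)
    (hf : S.find? v = some p)
    (hs : ∀ q ∈ S, 1 ≤ s q)
    (hp : S.Pairwise (fun a b => s b ≤ s a)) :
    s p = pvM s v S := by
  induction S with
  | nil => simp at hf
  | cons x t ih =>
    rcases List.pairwise_cons.mp hp with ⟨hhead, htail⟩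
    have hst : ∀ q ∈ t, 1 ≤ s q := fun q hq => hs q (by simp [hq])
    by_cases hv : v x
    · rw [List.find?_cons_of_pos hv] at hf
      have hxp : x = p := by injection hf
      subst hxp
      have hx := hs x (by simp)
      have hle : pvM s v t ≤ s x := pvM_le s v t _ (by omega) (fun q hq => hhead q hq)
      simp only [pvM, List.foldr, hv, if_pos] at *
      omega
    · rw [List.find?_cons_of_neg (by simpa using hv)] at hf
      have hih := ih hf hst htail
      have hnn := pvM_nonneg s v t
      simp only [pvM, List.foldr] at *
      rw [if_neg hv]
      omega

-- no element is valid: the max score is 0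
theorem pvFind_none {α : Type} (s : α → Int) (v : α → Bool) (S : List α)
    (hf : S.find? v = none) : pvM s v S = 0 := by
  induction S with
  | nil => simp [pvM]
  | cons x t ih =>
    have hx : ¬ v x = true := by
      simpa using List.find?_eq_none.mp hf x (by simp)
    have ht : t.find? v = none := by
      rw [List.find?_eq_none]
      intro q hq
      simpa using List.find?_eq_none.mp hf q (by simp [hq])
    have hih := ih ht
    simp only [pvM, List.foldr] at *
    rw [if_neg hx]
    omega

-- A's pairs list (index form)
def pvPairs (corners : List (Int × Int)) : List ((Int × Int) × (Int × Int)) :=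
  (PySem.List.pyRange 0 (corners.length : Int) 1).flatMap (fun i =>
    (PySem.List.pyRange (i + 1) (corners.length : Int) 1).map (fun j =>
      (PySem.List.pyGetD corners i (0, 0), PySem.List.pyGetD corners j (0, 0))))

-- the pairs list over range(n) equals the one over range(n-1) (the last inner range is empty)
theorem pvPairs_eq (corners : List (Int × Int)) :
    pvPairs corners
      = (PySem.List.pyRange 0 ((corners.length : Int) - 1) 1).flatMap (fun i =>
          (PySem.List.pyRange (i + 1) (corners.length : Int) 1).map (fun j =>
            (PySem.List.pyGetD corners i (0, 0), PySem.List.pyGetD corners j (0, 0)))) := by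
  unfold pvPairs
  rcases Nat.eq_zero_or_pos corners.length with h0 | hpos
  · simp [h0, PySem.List.pyRange_one_eq_nil]
  · have hn : (0:Int) ≤ (corners.length : Int) - 1 := by omega
    have hsplit : PySem.List.pyRange 0 (corners.length : Int) 1
        = PySem.List.pyRange 0 ((corners.length : Int) - 1) 1 ++ [(corners.length : Int) - 1] := by
      have := PySem.List.pyRange_one_succ_right (a := 0) (b := (corners.length : Int) - 1) hn
      simpa using this
    rw [hsplit, List.flatMap_append]
    simp [PySem.List.pyRange_one_eq_nil]

-- A unfolded: its nested loops are the prune-and-track fold over the flattened pairs list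
theorem part2_eq_fold (corners : List (Int × Int)) :
    part2 corners
      = (pvPairs corners).foldl (fun acc p =>
          if pvArea p.1 p.2 ≤ acc then acc
          else if pvValid (pvSegments corners) p.1 p.2 then pvArea p.1 p.2 else acc) 0 := by
  rw [pvPairs_eq, List.foldl_flatMap]
  simp only [List.foldl_map]
  rfl

-- shifting a unit-step range by one
theorem pvRange_shift (a b : Int) :
    PySem.List.pyRange (a + 1) (b + 1) 1 = (PySem.List.pyRange a b 1).map (fun x => x + 1) := by
  rw [PySem.List.pyRange_one, PySem.List.pyRange_one, List.map_map]
  have hb : (b + 1 - (a + 1)) = b - a := by ring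
  rw [hb]
  exact List.map_congr_left (fun k _ => by simp [Function.comp]; ring)

-- pyGetD on a cons at a shifted nonneg index
theorem pvGetD_cons_succ (c : Int × Int) (t : List (Int × Int)) (k : Nat) (d : Int × Int) :
    PySem.List.pyGetD (c :: t) ((k : Int) + 1) d = PySem.List.pyGetD t (k : Int) d := by
  have h : ((k : Int) + 1) = ((k + 1 : Nat) : Int) := by push_cast; ring
  rw [h, PySem.List.pyGetD_natCast, PySem.List.pyGetD_natCast, List.getD_cons_succ]

-- A's index pairs satisfy the tails recursion B's candidate builder uses
theorem pvPairs_cons (c : Int × Int) (t : List (Int × Int)) :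
    pvPairs (c :: t) = t.map (fun d => (c, d)) ++ pvPairs t := by
  unfold pvPairs
  have hlen : ((c :: t).length : Int) = (t.length : Int) + 1 := by simp
  rw [hlen]
  rw [PySem.List.pyRange_one_cons (by positivity)]
  rw [List.flatMap_cons]
  congr 1
  · rw [show (0:Int) + 1 = 0 + 1 from rfl]
    rw [pvRange_shift 0 (t.length : Int), List.map_map]
    have ht : t = (PySem.List.pyRange 0 (t.length : Int) 1).map
        (fun j => PySem.List.pyGetD t j (0,0)) := by
      rw [PySem.List.map_pyGetD_pyRange_zero']
    conv_rhs => rw [ht, List.map_map]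
    apply List.map_congr_left
    intro i hi
    have h0i : 0 ≤ i := (PySem.List.mem_pyRange_one.mp hi).1
    obtain ⟨k, rfl⟩ : ∃ k : Nat, i = (k : Int) := ⟨i.toNat, (Int.toNat_of_nonneg h0i).symm⟩
    simp only [Function.comp_apply]
    rw [pvGetD_cons_succ, PySem.List.pyGetD_zero_cons]
  · rw [pvRange_shift 0 (t.length : Int), List.flatMap_map]
    apply List.flatMap_congr
    intro i hi
    have h0i : 0 ≤ i := (PySem.List.mem_pyRange_one.mp hi).1
    obtain ⟨k, rfl⟩ : ∃ k : Nat, i = (k : Int) := ⟨i.toNat, (Int.toNat_of_nonneg h0i).symm⟩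
    try simp only [Function.comp_apply]
    rw [pvRange_shift ((k:Int) + 1) (t.length : Int), List.map_map]
    apply List.map_congr_left
    intro j hj
    have h0j : 0 ≤ j := le_trans (by positivity) (PySem.List.mem_pyRange_one.mp hj).1
    obtain ⟨m, rfl⟩ : ∃ m : Nat, j = (m : Int) := ⟨j.toNat, (Int.toNat_of_nonneg h0j).symm⟩
    simp only [Function.comp_apply]
    rw [pvGetD_cons_succ, pvGetD_cons_succ]

-- B's candidate list is A's pairs list mapped through the score/coordinate embedding
theorem pvCands_eq (corners : List (Int × Int)) :
    pvCands corners
      = (pvPairs corners).map (fun p => (pvArea p.1 p.2, p.1.1, p.1.2, p.2.1, p.2.2)) := by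
  induction corners with
  | nil => simp [pvCands, pvPairs, PySem.List.pyRange_one_eq_nil]
  | cons c t ih =>
    rw [pvPairs_cons, List.map_append, List.map_map]
    simp only [pvCands, ih]
    rfl

-- A's index/mod-built segment list equals B's zip-based one
theorem pvSegments_eq (corners : List (Int × Int)) :
    pvSegments corners = pvSegs corners := by
  unfold pvSegments pvSegs
  rcases corners with _ | ⟨c, t⟩
  · simp [PySem.List.pyRange_one_eq_nil]
  · set l := c :: t with hl
    have hlpos : 0 < l.length := by simp [hl]
    apply List.ext_getElem
    · simp [PySem.List.length_pyRange_one]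
      omega
    · intro k hk1 hk2
      have hkn : k < l.length := by
        simpa [PySem.List.length_pyRange_one] using hk1
      have hzlen : (l.drop 1 ++ l.take 1).length = l.length := by
        simp; omega
      rw [List.getElem_map, PySem.List.getElem_pyRange_one, List.getElem_zip]
      have hg1 : PySem.List.pyGetD l (0 + (k:Int)) (0,0) = l[k] := by
        rw [show (0 + (k:Int)) = ((k:Nat):Int) by ring, PySem.List.pyGetD_natCast,
            List.getD_eq_getElem l (0,0) hkn]
      have hmod : PySem.Int.mod (0 + (k:Int) + 1) (l.length : Int)
          = if k + 1 < l.length then ((k+1 : Nat) : Int) else 0 := by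
        rw [PySem.Int.mod_eq_emod_of_pos (by exact_mod_cast hlpos)]
        by_cases h : k + 1 < l.length
        · rw [if_pos h, Int.emod_eq_of_lt (by positivity) (by omega)]
          push_cast; ring
        · have : k + 1 = l.length := by omega
          rw [if_neg h, show (0 + (k:Int) + 1) = (l.length : Int) by omega,
              Int.emod_self]
      have hg2 : PySem.List.pyGetD l (PySem.Int.mod (0 + (k:Int) + 1) (l.length : Int)) (0,0)
          = (l.drop 1 ++ l.take 1)[k]'(by omega) := by
        rw [hmod]
        by_cases h : k + 1 < l.length
        · rw [if_pos h, PySem.List.pyGetD_natCast, List.getD_eq_getElem l (0,0) h,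
              List.getElem_append_left (by simp; omega)]
          simp
        · have hke : k = l.length - 1 := by omega
          rw [if_neg h, show ((0:Int)) = ((0:Nat):Int) by norm_num, PySem.List.pyGetD_natCast]
          rw [List.getD_eq_getElem l _ hlpos, List.getElem_append_right (by simp; omega)]
          simp [hke]
      rw [hg1, hg2]

-- per-segment: A's hit test at the sorted bounds = B's inline test
theorem pvHits_eq (seg : (Int × Int) × (Int × Int)) (x1 y1 x2 y2 : Int) :
    pvSegHits seg (min x1 x2) (max x1 x2) (min y1 y2) (max y1 y2)
      = (if seg.1.1 = seg.2.1 then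
          decide (min x1 x2 < seg.1.1 ∧ seg.1.1 < max x1 x2) &&
            decide (max (min seg.1.2 seg.2.2) (min y1 y2) < min (max seg.1.2 seg.2.2) (max y1 y2))
         else
          decide (min y1 y2 < seg.1.2 ∧ seg.1.2 < max y1 y2) &&
            decide (max (min seg.1.1 seg.2.1) (min x1 x2) < min (max seg.1.1 seg.2.1) (max x1 x2))) := by
  simp only [pvSegHits]
  by_cases h : seg.1.1 = seg.2.1
  · simp only [if_pos h]
    by_cases hC : min x1 x2 < seg.1.1 ∧ seg.1.1 < max x1 x2
    · simp [hC]
    · simp [← decide_not, not_le]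
  · simp only [if_neg h]
    by_cases hC : min y1 y2 < seg.1.2 ∧ seg.1.2 < max y1 y2
    · simp [hC]
    · simp [← decide_not, not_le]

-- A's validity test = negation of B's blocked test, over the same segment list
theorem pvValid_eq (segs : List ((Int × Int) × (Int × Int))) (c1 c2 : Int × Int) :
    pvValid segs c1 c2 = ! pvBlocked segs c1.1 c1.2 c2.1 c2.2 := by
  simp only [pvValid, pvBlocked]
  exact congrArg (fun b => !b)
    (congrArg (List.any segs) (funext fun seg => pvHits_eq seg c1.1 c1.2 c2.1 c2.2))

-- B unfolded: first valid of the sorted candidates = max score over all candidates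
theorem part2_alt_eq (corners : List (Int × Int)) :
    part2_alt corners
      = pvM (fun t : Int × Int × Int × Int × Int => t.1)
          (fun t => ! pvBlocked (pvSegs corners) t.2.1 t.2.2.1 t.2.2.2.1 t.2.2.2.2)
          (pvCands corners) := by
  have hS1 : ∀ t ∈ PySem.List.sorted (pvCands corners) (fun t => t.1) true, 1 ≤ t.1 := by
    intro t ht
    rw [PySem.List.mem_sorted, pvCands_eq] at ht
    rcases List.mem_map.mp ht with ⟨p, _, rfl⟩
    exact pvArea_one_le p.1 p.2
  have hMps : pvM (fun t : Int × Int × Int × Int × Int => t.1)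
        (fun t => ! pvBlocked (pvSegs corners) t.2.1 t.2.2.1 t.2.2.2.1 t.2.2.2.2)
        (PySem.List.sorted (pvCands corners) (fun t => t.1) true)
      = pvM (fun t : Int × Int × Int × Int × Int => t.1)
        (fun t => ! pvBlocked (pvSegs corners) t.2.1 t.2.2.1 t.2.2.2.1 t.2.2.2.2)
        (pvCands corners) := by
    unfold pvM
    exact List.Perm.foldr_eq' (PySem.List.sorted_perm _ _ _)
      (by intro x _ y _ a; exact max_left_comm _ _ _) 0
  simp only [part2_alt]
  rcases hf : (PySem.List.sorted (pvCands corners) (fun t => t.1) true).find?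
      (fun t => ! pvBlocked (pvSegs corners) t.2.1 t.2.2.1 t.2.2.2.1 t.2.2.2.2) with _ | t
  · rw [← hMps, pvFind_none _ _ _ hf, hf]
  · rw [← hMps, ← pvFind_some _ _ _ t hf hS1 (PySem.List.sorted_pairwise_rev _ _), hf]

-- ===== VERDICT (by name: the statement is the Claim_ definition above) =====
theorem part2_spec : Claim_equal_part2 := by
  intro corners _
  unfold Spec_part2
  have hA : part2 corners
      = pvM (fun p => pvArea p.1 p.2)
          (fun p => pvValid (pvSegments corners) p.1 p.2) (pvPairs corners) := by
    rw [part2_eq_fold,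
        pvA_fold _ _ _ (fun p _ => pvArea_one_le p.1 p.2) 0 le_rfl]
    exact max_eq_right (pvM_nonneg _ _ _)
  rw [hA, part2_alt_eq, pvCands_eq]
  unfold pvM
  rw [List.foldr_map]
  congr 1
  funext p m
  beta_reduce
  have hvv : pvValid (pvSegments corners) p.1 p.2
      = ! pvBlocked (pvSegs corners) p.1.1 p.1.2 p.2.1 p.2.2 := by
    rw [pvSegments_eq]
    exact pvValid_eq _ _ _
  rw [hvv]
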